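-- pv_equiv track=rewrite | github.com/mini-moon/advert_of_code_2021 | day10/day10.py | _check_if_match_char
-- ===== SOURCE A (Python) =====
-- CHAR_PAIRS = {"(":")","{":"}","[":"]","<":">"}
--
-- def _check_if_match_char(chars):
--     bucket = []
--     for char in chars:
--         if bucket and char == CHAR_PAIRS.get(bucket[-1]):
--             bucket = bucket[:-1]
--         else:
--             bucket.append(char)
--     return bucket
-- ===== SOURCE B (Python) =====
-- CHAR_PAIRS = {"(":")","{":"}","[":"]","<":">"}
--
-- def _check_if_match_char(chars):
--     items = list(chars)
--     while True:
--         out = []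
--         i = 0
--         n = len(items)
--         while i < n:
--             if i + 1 < n and items[i + 1] == CHAR_PAIRS.get(items[i]):
--                 i += 2
--             else:
--                 out.append(items[i])
--                 i += 1
--         if len(out) == n:
--             return out
--         items = out
-- ===== Notes on version B (the rewrite author's own statement) =====
-- stated objective: alternative
-- what changed: Replaces A's single left-to-right stack (push char / pop on match) with repeated whole-list scans that delete every adjacent matching bracket pair, iterated to a fixpoint; the rewrite system is confluent so the leftover is identical.
import Mathlib
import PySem

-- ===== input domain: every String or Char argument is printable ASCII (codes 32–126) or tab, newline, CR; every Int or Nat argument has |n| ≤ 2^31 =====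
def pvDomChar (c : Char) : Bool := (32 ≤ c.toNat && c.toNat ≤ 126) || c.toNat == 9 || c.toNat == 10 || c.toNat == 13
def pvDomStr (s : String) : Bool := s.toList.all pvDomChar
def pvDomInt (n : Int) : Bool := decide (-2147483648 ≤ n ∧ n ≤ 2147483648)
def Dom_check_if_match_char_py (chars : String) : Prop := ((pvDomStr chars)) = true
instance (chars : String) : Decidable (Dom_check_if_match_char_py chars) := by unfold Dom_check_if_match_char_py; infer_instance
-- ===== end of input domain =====

-- B replaces A's left-to-right stack with repeated whole-list passes cancelling adjacent
-- matching bracket pairs until a pass removes nothing (objective: alternative algorithm,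
-- same cost class).

-- CHAR_PAIRS.get : returns the closing bracket for an opener, none otherwise
def pairGet (s : String) : Option String :=
  if s = "(" then some ")"
  else if s = "{" then some "}"
  else if s = "[" then some "]"
  else if s = "<" then some ">"
  else none

-- ===== PORT A =====
-- one iteration of A's for-loop: 'if bucket and char == CHAR_PAIRS.get(bucket[-1])'
def stepA (bucket : List String) (ch : String) : List String :=
  match bucket.getLast? with
  | some last => if some ch = pairGet last then bucket.dropLast else bucket ++ [ch]
  | none => bucket ++ [ch]

def check_if_match_char_py (chars : String) : List String :=
  chars.toList.foldl (fun bucket c => stepA bucket (String.singleton c)) []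

-- ===== PORT B =====
-- inner while-loop of Source B: one scan, skipping every adjacent pair (x, CHAR_PAIRS.get(x))
def onePass : List String → List String
  | x :: y :: rest => if some y = pairGet x then onePass rest else x :: onePass (y :: rest)
  | xs => xs

theorem onePass_short (xs : List String) (h : ∀ x y rest, xs ≠ x :: y :: rest) :
    onePass xs = xs := by
  match xs, h with
  | [], _ => rfl
  | [a], _ => rfl
  | x :: y :: rest, h => exact absurd rfl (h x y rest)

theorem onePass_length_le (xs : List String) : (onePass xs).length ≤ xs.length := by
  induction xs using onePass.induct with
  | case1 x y rest h ih => simp only [onePass, if_pos h, List.length_cons]; omega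
  | case2 x y rest h ih =>
      simp only [onePass, if_neg h, List.length_cons] at ih ⊢; omega
  | case3 xs hfb => rw [onePass_short xs hfb]

-- outer while-loop of Source B: repeat onePass until a pass removes nothing
def fixB (items : List String) : List String :=
  let out := onePass items
  if h : out.length = items.length then out else fixB out
  termination_by items.length
  decreasing_by
    exact Nat.lt_of_le_of_ne (onePass_length_le items) h

def check_if_match_char_py_alt (chars : String) : List String :=
  fixB (chars.toList.map String.singleton)

-- ===== PRECONDITION & SPEC =====
def Spec_check_if_match_char_py (chars : String) (out : List String) : Prop := out = check_if_match_char_py_alt chars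
instance (chars : String) (out : List String) : Decidable (Spec_check_if_match_char_py chars out) := by unfold Spec_check_if_match_char_py; infer_instance

-- ===== CLAIM (what is proved, stated in full; the proofs are below) =====
def Claim_equal_check_if_match_char_py : Prop := ∀ (chars : String), Dom_check_if_match_char_py chars → Spec_check_if_match_char_py chars (check_if_match_char_py chars)

-- ===== LEMMAS AND PROOFS =====

-- proof device: the right-to-left reduction; R xs is the common normal form
def push (c : String) (r : List String) : List String :=
  match r with
  | [] => [c]
  | h :: t => if pairGet c = some h then t else c :: r

def R (xs : List String) : List String := xs.foldr push []

-- a closer (anything in the range of pairGet) has no pair of its own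
theorem pairGet_of_range {x y : String} (h : pairGet x = some y) : pairGet y = none := by
  unfold pairGet at h
  split_ifs at h
  all_goals injection h with h2
  all_goals subst h2
  all_goals decide

theorem push_cancel {x y : String} (h : pairGet x = some y) (r : List String) :
    push x (push y r) = r := by
  have hy := pairGet_of_range h
  cases r with
  | nil => simp [push, h]
  | cons a t => simp [push, hy, h]

theorem foldr_push_append (u v : List String) (r : List String) :
    List.foldr push r (u ++ v) = List.foldr push (List.foldr push r v) u := by
  simp [List.foldr_append]

-- one pass preserves the normal form
theorem R_onePass (xs : List String) : R (onePass xs) = R xs := by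
  induction xs using onePass.induct with
  | case1 x y rest h ih =>
      simp only [onePass, if_pos h]
      rw [ih]
      show R rest = List.foldr push (List.foldr push (R rest) [y]) [x]
      simp only [List.foldr]
      exact (push_cancel h.symm (R rest)).symm
  | case2 x y rest h ih =>
      simp only [onePass, if_neg h]
      show push x (R (onePass (y :: rest))) = push x (R (y :: rest))
      rw [ih]
  | case3 xs h => rw [onePass_short xs h]

-- a length-preserving pass removed nothing
theorem onePass_eq_of_length (xs : List String) (h : (onePass xs).length = xs.length) :
    onePass xs = xs := by
  induction xs using onePass.induct with
  | case1 x y rest hc ih =>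
      exfalso
      have := onePass_length_le rest
      simp only [onePass, if_pos hc] at h
      simp at h; omega
  | case2 x y rest hc ih =>
      simp only [onePass, if_neg hc] at h ⊢
      simp only [List.length_cons, Nat.add_right_cancel_iff] at h
      rw [ih h]
  | case3 xs hfb => rw [onePass_short xs hfb]

-- a fixpoint of onePass is already in normal form
theorem R_eq_of_onePass_fix (xs : List String) (h : onePass xs = xs) : R xs = xs := by
  induction xs using onePass.induct with
  | case1 x y rest hc ih =>
      exfalso
      have hl := onePass_length_le rest
      have : (onePass (x :: y :: rest)).length = (x :: y :: rest).length := by rw [h]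
      simp only [onePass, if_pos hc] at this
      simp at this; omega
  | case2 x y rest hc ih =>
      simp only [onePass, if_neg hc, List.cons.injEq] at h
      have := ih h.2
      show push x (R (y :: rest)) = x :: y :: rest
      rw [this]
      have hne : pairGet x ≠ some y := fun hh => hc hh.symm
      simp [push, hne]
  | case3 xs hx =>
      match xs, hx with
      | [], _ => rfl
      | [a], _ => rfl
      | x :: y :: rest, hx => exact absurd rfl (hx x y rest)

theorem fixB_eq_R (items : List String) : fixB items = R items := by
  generalize hn : items.length = n
  induction n using Nat.strong_induction_on generalizing items with
  | _ n ih =>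
    subst hn
    rw [fixB]
    by_cases h : (onePass items).length = items.length
    · simp only [dif_pos h]
      have hfix := onePass_eq_of_length items h
      rw [hfix, R_eq_of_onePass_fix items hfix]
    · simp only [dif_neg h]
      have hlt : (onePass items).length < items.length :=
        Nat.lt_of_le_of_ne (onePass_length_le items) h
      rw [ih _ hlt _ rfl, R_onePass]

-- the key invariant for A's stack: no adjacent cancellable pair in the bucket
def Irr (b : List String) : Prop := List.IsChain (fun a c => some c ≠ pairGet a) b

theorem R_eq_of_Irr (b : List String) (h : Irr b) : R b = b := by
  induction b with
  | nil => rfl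
  | cons c b' ih =>
      have h' : Irr b' := h.tail
      show push c (R b') = c :: b'
      rw [ih h']
      cases b' with
      | nil => rfl
      | cons a t =>
          have : some a ≠ pairGet c := h.rel_head
          have hne : pairGet c ≠ some a := fun hh => this hh.symm
          simp [push, hne]

theorem Irr_step (b : List String) (c : String) (h : Irr b) : Irr (stepA b c) := by
  unfold stepA
  cases hl : b.getLast? with
  | none =>
      have : b = [] := List.getLast?_eq_none_iff.mp hl
      subst this
      exact List.isChain_singleton _
  | some last =>
      dsimp only
      split_ifs with hc
      · exact h.dropLast
      · refine List.IsChain.append h (List.isChain_singleton _) ?_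
        intro x hx y hy
        rw [hl] at hx
        simp only [Option.mem_def, Option.some.injEq] at hx
        simp only [List.head?_cons, Option.mem_def, Option.some.injEq] at hy
        subst hx; subst hy
        exact fun hh => hc hh

-- main loop invariant: the stack result equals pushing the bucket onto the tail's normal form
theorem foldl_stepA (xs : List String) : ∀ b : List String, Irr b →
    xs.foldl stepA b = List.foldr push (R xs) b := by
  induction xs with
  | nil =>
      intro b hb
      simpa [R] using (R_eq_of_Irr b hb).symm
  | cons c xs ih =>
      intro b hb
      show xs.foldl stepA (stepA b c) = List.foldr push (push c (R xs)) b
      rw [ih (stepA b c) (Irr_step b c hb)]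
      unfold stepA
      cases hl : b.getLast? with
      | none =>
          have : b = [] := List.getLast?_eq_none_iff.mp hl
          subst this; rfl
      | some last =>
          dsimp only
          split_ifs with hc
          · -- pop: b = b'' ++ [last], and push last (push c r) = r
            obtain ⟨b'', rfl⟩ := List.getLast?_eq_some_iff.mp hl
            rw [List.dropLast_concat, foldr_push_append]
            simp only [List.foldr]
            rw [push_cancel hc.symm]
          · rw [foldr_push_append]
            rfl

-- ===== VERDICT (by name: the statement is the Claim_ definition above) =====
theorem check_if_match_char_py_spec : Claim_equal_check_if_match_char_py := by
  intro chars _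
  show check_if_match_char_py chars = check_if_match_char_py_alt chars
  unfold check_if_match_char_py check_if_match_char_py_alt
  rw [fixB_eq_R]
  have := foldl_stepA (chars.toList.map String.singleton) [] (by simp [Irr])
  simpa [R, List.foldl_map] using this
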